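-- pv_equiv track=rewrite | github.com/OcMalde/human-paralog-db | scripts/lib/seq_align.py | alignment_to_columns
-- ===== SOURCE A (Python) =====
-- from typing import Tuple, List
--
-- def alignment_to_columns(aln1: str, aln2: str) -> List[Tuple[int, int, int]]:
--     """
--     Convert aligned sequences to column format like foldseek.
--
--     Returns:
--         List of (col, qpos, tpos) tuples where positions are 1-indexed
--         or None if gap
--     """
--     cols = []
--     qpos = 0
--     tpos = 0
--
--     for col_idx, (aa1, aa2) in enumerate(zip(aln1, aln2), 1):
--         q = None if aa1 == '-' else (qpos + 1)
--         t = None if aa2 == '-' else (tpos + 1)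
--
--         cols.append((col_idx, q, t))
--
--         if aa1 != '-':
--             qpos += 1
--         if aa2 != '-':
--             tpos += 1
--
--     return cols
-- ===== SOURCE B (Python) =====
-- def alignment_to_columns(aln1, aln2):
--     """Two-phase: precompute inclusive non-gap prefix-count tables, then emit columns."""
--     pairs = list(zip(aln1, aln2))
--     q_counts = []
--     t_counts = []
--     qs = 0
--     ts = 0
--     for a, b in pairs:
--         qs += 0 if a == '-' else 1
--         ts += 0 if b == '-' else 1
--         q_counts.append(qs)
--         t_counts.append(ts)
--     return [(i, None if a == '-' else q, None if b == '-' else t)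
--             for i, ((a, b), (q, t)) in enumerate(zip(pairs, zip(q_counts, t_counts)), 1)]
-- ===== Notes on version B (the rewrite author's own statement) =====
-- stated objective: alternative
-- what changed: Replaces A's single loop with interleaved running counters by a two-phase decomposition: first materialize inclusive non-gap prefix-count tables for both sequences, then a separate pass over the zipped columns reads positions from those tables.
import Mathlib
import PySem

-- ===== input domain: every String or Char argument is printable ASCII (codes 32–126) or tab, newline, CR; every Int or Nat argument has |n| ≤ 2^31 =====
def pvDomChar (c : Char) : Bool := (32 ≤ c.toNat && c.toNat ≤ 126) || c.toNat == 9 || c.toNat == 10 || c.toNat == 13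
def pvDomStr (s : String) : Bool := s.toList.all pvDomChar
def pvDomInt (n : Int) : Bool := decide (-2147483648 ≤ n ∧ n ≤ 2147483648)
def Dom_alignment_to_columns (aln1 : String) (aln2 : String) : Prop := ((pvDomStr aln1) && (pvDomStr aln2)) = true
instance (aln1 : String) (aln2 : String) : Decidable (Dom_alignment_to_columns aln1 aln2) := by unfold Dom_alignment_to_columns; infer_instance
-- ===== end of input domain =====

-- B replaces A's interleaved running counters with precomputed non-gap prefix-count tables consumed in a second pass (alternative decomposition, same cost).


-- ===== PORT A =====
-- A's loop: one pass over zip(aln1, aln2) with column index and two running counters qpos, tpos.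
def pvGoA : List (Char × Char) → Int → Int → Int → List (Int × Option Int × Option Int)
  | [], _, _, _ => []
  | (a, b) :: rest, idx, qpos, tpos =>
    (idx, if a = '-' then none else some (qpos + 1), if b = '-' then none else some (tpos + 1)) ::
      pvGoA rest (idx + 1) (qpos + if a = '-' then 0 else 1) (tpos + if b = '-' then 0 else 1)

def alignment_to_columns (aln1 : String) (aln2 : String) : List (Int × Option Int × Option Int) :=
  pvGoA (aln1.toList.zip aln2.toList) 1 0 0

-- ===== PORT B =====
-- inclusive running sums (B's first-pass loop building q_counts/t_counts)
def pvAccum : List Int → Int → List Int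
  | [], _ => []
  | x :: xs, s => (s + x) :: pvAccum xs (s + x)

-- B's second pass: emit a column from each (pair, (q_count, t_count)) triple with its 1-based index
def pvGoB : List ((Char × Char) × Int × Int) → Int → List (Int × Option Int × Option Int)
  | [], _ => []
  | ((a, b), q, t) :: rest, idx =>
    (idx, if a = '-' then none else some q, if b = '-' then none else some t) :: pvGoB rest (idx + 1)

def alignment_to_columns_alt (aln1 : String) (aln2 : String) : List (Int × Option Int × Option Int) :=
  let pairs := aln1.toList.zip aln2.toList
  let qc := pvAccum (pairs.map (fun p => if p.1 = '-' then (0 : Int) else 1)) 0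
  let tc := pvAccum (pairs.map (fun p => if p.2 = '-' then (0 : Int) else 1)) 0
  pvGoB (pairs.zip (qc.zip tc)) 1

-- ===== PRECONDITION & SPEC =====
def Spec_alignment_to_columns (aln1 : String) (aln2 : String) (out : List (Int × Option Int × Option Int)) : Prop := out = alignment_to_columns_alt aln1 aln2
instance (aln1 : String) (aln2 : String) (out : List (Int × Option Int × Option Int)) : Decidable (Spec_alignment_to_columns aln1 aln2 out) := by unfold Spec_alignment_to_columns; infer_instance

-- ===== CLAIM (what is proved, stated in full; the proofs are below) =====
def Claim_equal_alignment_to_columns : Prop := ∀ (aln1 : String) (aln2 : String), Dom_alignment_to_columns aln1 aln2 → Spec_alignment_to_columns aln1 aln2 (alignment_to_columns aln1 aln2)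

-- ===== LEMMAS AND PROOFS =====
theorem pvGoA_eq_pvGoB (pairs : List (Char × Char)) (idx qpos tpos : Int) :
    pvGoA pairs idx qpos tpos =
      pvGoB (pairs.zip ((pvAccum (pairs.map (fun p => if p.1 = '-' then (0 : Int) else 1)) qpos).zip
                        (pvAccum (pairs.map (fun p => if p.2 = '-' then (0 : Int) else 1)) tpos))) idx := by
  induction pairs generalizing idx qpos tpos with
  | nil => simp [pvGoA, pvGoB, pvAccum]
  | cons p rest ih =>
    obtain ⟨a, b⟩ := p
    simp only [pvGoA, List.map_cons, pvAccum, List.zip_cons_cons, pvGoB, ih]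
    by_cases ha : a = '-' <;> by_cases hb : b = '-' <;> simp [ha, hb]

theorem alignment_to_columns_spec : Claim_equal_alignment_to_columns := by
  intro aln1 aln2 _
  unfold Spec_alignment_to_columns alignment_to_columns alignment_to_columns_alt
  exact pvGoA_eq_pvGoB _ 1 0 0
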